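-- pv_equiv track=rewrite | github.com/rabidvermin/ICEbreaker | certsiphon.py | collect_domains
-- ===== SOURCE A (Python) =====
-- def extract_sld(fqdn):
--     """Extract second-level domain from an FQDN. Strips leading wildcard."""
--     fqdn = fqdn.lstrip('*.')
--     parts = fqdn.split('.')
--     return '.'.join(parts[-2:]) if len(parts) >= 2 else fqdn
--
-- def collect_domains(results, wildcards_only=False):
--     """Aggregate unique FQDNs and SLDs across all results."""
--     fqdns, slds = set(), set()
--     for r in results:
--         info = r.get('cert_info')
--         if not info:
--             continue
--         for fqdn in info.get('fqdns', []):
--             if wildcards_only and not fqdn.startswith('*.'):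
--                 continue
--             fqdns.add(fqdn)
--             slds.add(extract_sld(fqdn))
--     return sorted(fqdns), sorted(slds)
-- ===== SOURCE B (Python) =====
-- def extract_sld(fqdn):
--     """Extract second-level domain from an FQDN. Strips leading wildcard."""
--     fqdn = fqdn.lstrip('*.')
--     parts = fqdn.split('.')
--     return '.'.join(parts[-2:]) if len(parts) >= 2 else fqdn
--
-- def _dedup_sorted(xs):
--     """Collapse duplicates in an already-sorted list (recursive adjacent-dedup)."""
--     if not xs:
--         return []
--     rest = _dedup_sorted(xs[1:])
--     if rest and rest[0] == xs[0]:
--         return rest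
--     return [xs[0]] + rest
--
-- def collect_domains(results, wildcards_only=False):
--     """Aggregate unique FQDNs and SLDs across all results."""
--     raw = []
--     for r in results:
--         info = r.get('cert_info')
--         if info:
--             raw.extend(info.get('fqdns', []))
--     if wildcards_only:
--         raw = [f for f in raw if f.startswith('*.')]
--     fqdns = _dedup_sorted(sorted(raw))
--     slds = _dedup_sorted(sorted(extract_sld(f) for f in raw))
--     return fqdns, slds
-- ===== Notes on version B (the rewrite author's own statement) =====
-- stated objective: alternative
-- what changed: Drops the hash sets entirely: B first gathers all kept FQDNs into a plain list with duplicates (filtering wildcards in a separate post-pass), then sorts and collapses adjacent duplicates with a recursive dedup helper, computing the SLD list by the same sort-then-adjacent-dedup over the mapped raw list.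
import Mathlib
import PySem

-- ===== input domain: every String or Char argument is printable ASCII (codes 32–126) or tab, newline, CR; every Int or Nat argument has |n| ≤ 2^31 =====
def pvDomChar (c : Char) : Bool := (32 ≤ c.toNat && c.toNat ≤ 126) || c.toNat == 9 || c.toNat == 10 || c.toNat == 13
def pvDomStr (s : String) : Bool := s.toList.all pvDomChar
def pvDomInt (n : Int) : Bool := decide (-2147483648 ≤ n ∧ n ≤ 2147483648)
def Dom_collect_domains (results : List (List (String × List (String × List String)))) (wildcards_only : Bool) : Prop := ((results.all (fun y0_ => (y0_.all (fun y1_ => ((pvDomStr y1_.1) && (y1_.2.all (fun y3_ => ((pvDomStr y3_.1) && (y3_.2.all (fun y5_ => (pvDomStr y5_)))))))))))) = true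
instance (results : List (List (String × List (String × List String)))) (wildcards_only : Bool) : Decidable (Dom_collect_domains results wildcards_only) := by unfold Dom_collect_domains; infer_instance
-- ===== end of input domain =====

-- B drops the hash sets: it gathers all kept FQDNs into one plain list with duplicates
-- (wildcard filter as a separate post-pass), then sorts and collapses adjacent duplicates
-- with a recursive dedup helper, for FQDNs and for the mapped SLDs alike (objective: alternative).

-- ===== PORT A =====
-- shared helper, identical in Source A and Source B
def extract_sld (fqdn : String) : String :=
  -- fqdn.lstrip('*.') : drop leading characters belonging to {'*','.'} (exact, hand-ported)
  let fqdn := String.ofList (fqdn.toList.dropWhile (fun c => c == '*' || c == '.'))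
  let parts := (PySem.Str.split? fqdn ".").getD []   -- sep "." ≠ "" so split? is always some
  if parts.length ≥ 2 then PySem.Str.join "." (PySem.List.slice parts (some (-2)) none)
  else fqdn

def collect_domains (results : List (List (String × List (String × List String)))) (wildcards_only : Bool) : List String × List String :=
  let st : PySem.Set String × PySem.Set String :=
    results.foldl (fun acc r =>
      match PySem.Dict.get? (PySem.Dict.mk r) "cert_info" with
      | none => acc                          -- `if not info: continue` (key absent)
      | some info =>
        if info = [] then acc                -- `if not info: continue` (empty dict)
        else (PySem.Dict.getD (PySem.Dict.mk info) "fqdns" []).foldl (fun acc fqdn =>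
          if wildcards_only && !(PySem.Str.startswith fqdn "*.") then acc
          else (PySem.Set.add acc.1 fqdn, PySem.Set.add acc.2 (extract_sld fqdn))) acc)
      ([], [])
  (PySem.List.sorted st.1 (fun x => x), PySem.List.sorted st.2 (fun x => x))

-- ===== PORT B =====
-- _dedup_sorted from Source B: recursive adjacent-duplicate collapse of a sorted list
def dedupSorted : List String → List String
  | [] => []
  | x :: xs =>
    let rest := dedupSorted xs
    if rest ≠ [] ∧ rest.head? = some x then rest else x :: rest

def collect_domains_alt (results : List (List (String × List (String × List String)))) (wildcards_only : Bool) : List String × List String :=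
  let raw0 : List String :=
    results.foldl (fun acc r =>
      match PySem.Dict.get? (PySem.Dict.mk r) "cert_info" with
      | none => acc                          -- `if info:` false (key absent)
      | some info =>
        if info = [] then acc                -- `if info:` false (empty dict)
        else acc ++ PySem.Dict.getD (PySem.Dict.mk info) "fqdns" []) []
  let raw : List String :=
    if wildcards_only then raw0.filter (fun f => PySem.Str.startswith f "*.") else raw0
  (dedupSorted (PySem.List.sorted raw (fun x => x)),
   dedupSorted (PySem.List.sorted (raw.map extract_sld) (fun x => x)))

-- ===== PRECONDITION & SPEC =====
def Spec_collect_domains (results : List (List (String × List (String × List String)))) (wildcards_only : Bool) (out : List String × List String) : Prop := out = collect_domains_alt results wildcards_only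
instance (results : List (List (String × List (String × List String)))) (wildcards_only : Bool) (out : List String × List String) : Decidable (Spec_collect_domains results wildcards_only out) := by unfold Spec_collect_domains; infer_instance

-- ===== CLAIM (what is proved, stated in full; the proofs are below) =====
def Claim_equal_collect_domains : Prop := ∀ (results : List (List (String × List (String × List String)))) (wildcards_only : Bool), Dom_collect_domains results wildcards_only → Spec_collect_domains results wildcards_only (collect_domains results wildcards_only)

-- ===== LEMMAS AND PROOFS =====

-- the filtered, flattened list of FQDNs both programs effectively traverse
def keptList (results : List (List (String × List (String × List String)))) (w : Bool) : List String :=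
  (results.flatMap (fun r =>
      PySem.Dict.getD (PySem.Dict.mk (((PySem.Dict.get? (PySem.Dict.mk r) "cert_info")).getD [])) "fqdns" [])).filter
    (fun f => !w || PySem.Str.startswith f "*.")

-- A's inner loop splits into two independent folds over the filtered fqdn list
theorem inner_split (w : Bool) (xs : List String) (a b : PySem.Set String) :
    xs.foldl (fun (acc : PySem.Set String × PySem.Set String) fqdn =>
        if w && !(PySem.Str.startswith fqdn "*.") then acc
        else (PySem.Set.add acc.1 fqdn, PySem.Set.add acc.2 (extract_sld fqdn))) (a, b)
    = (List.foldl PySem.Set.add a (xs.filter (fun f => !w || PySem.Str.startswith f "*.")),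
       List.foldl (fun s f => PySem.Set.add s (extract_sld f)) b
         (xs.filter (fun f => !w || PySem.Str.startswith f "*."))) := by
  induction xs generalizing a b with
  | nil => simp
  | cons x xs ih =>
    have hb : (!w || PySem.Str.startswith x "*.") = !(w && !PySem.Str.startswith x "*.") := by
      cases w <;> cases PySem.Str.startswith x "*." <;> rfl
    cases h : (w && !PySem.Str.startswith x "*.") with
    | true =>
      simp only [List.foldl_cons, List.filter_cons, hb, h, Bool.not_true, if_true, if_false,
        Bool.false_eq_true, ih]
    | false =>
      simp only [List.foldl_cons, List.filter_cons, hb, h, Bool.not_false, if_true, if_false,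
        Bool.false_eq_true, ih]

-- A's whole pair-fold splits into two independent folds over keptList
theorem outer_split (results : List (List (String × List (String × List String)))) (w : Bool)
    (a b : PySem.Set String) :
    results.foldl (fun (acc : PySem.Set String × PySem.Set String) r =>
        match PySem.Dict.get? (PySem.Dict.mk r) "cert_info" with
        | none => acc
        | some info =>
          if info = [] then acc
          else (PySem.Dict.getD (PySem.Dict.mk info) "fqdns" []).foldl (fun acc fqdn =>
            if w && !(PySem.Str.startswith fqdn "*.") then acc
            else (PySem.Set.add acc.1 fqdn, PySem.Set.add acc.2 (extract_sld fqdn))) acc) (a, b)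
    = (List.foldl PySem.Set.add a (keptList results w),
       List.foldl (fun s f => PySem.Set.add s (extract_sld f)) b (keptList results w)) := by
  induction results generalizing a b with
  | nil => simp [keptList]
  | cons r rs ih =>
    have hk : keptList (r :: rs) w =
        ((PySem.Dict.getD (PySem.Dict.mk (((PySem.Dict.get? (PySem.Dict.mk r) "cert_info")).getD [])) "fqdns" []).filter
          (fun f => !w || PySem.Str.startswith f "*.")) ++ keptList rs w := by
      simp [keptList, List.flatMap_cons, List.filter_append]
    cases hinfo : PySem.Dict.get? (PySem.Dict.mk r) "cert_info" with
    | none =>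
      simp only [List.foldl_cons, hinfo, ih, hk, Option.getD_none]
      simp [PySem.Dict.getD, PySem.Dict.get?]
    | some info =>
      by_cases he : info = []
      · subst he
        simp only [List.foldl_cons, hinfo, reduceIte, ih, hk, Option.getD_some]
        simp [PySem.Dict.getD, PySem.Dict.get?]
      · simp only [List.foldl_cons, hinfo, if_neg he, inner_split, ih, hk, Option.getD_some,
          List.foldl_append]

-- B's appending fold is the flatMap of keptList before filtering
theorem raw0_eq (results : List (List (String × List (String × List String)))) (acc : List String) :
    results.foldl (fun acc r =>
        match PySem.Dict.get? (PySem.Dict.mk r) "cert_info" with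
        | none => acc
        | some info =>
          if info = [] then acc
          else acc ++ PySem.Dict.getD (PySem.Dict.mk info) "fqdns" []) acc
    = acc ++ results.flatMap (fun r =>
        PySem.Dict.getD (PySem.Dict.mk (((PySem.Dict.get? (PySem.Dict.mk r) "cert_info")).getD [])) "fqdns" []) := by
  induction results generalizing acc with
  | nil => simp
  | cons r rs ih =>
    cases hinfo : PySem.Dict.get? (PySem.Dict.mk r) "cert_info" with
    | none =>
      simp only [List.foldl_cons, hinfo, ih, List.flatMap_cons, Option.getD_none]
      simp [PySem.Dict.getD, PySem.Dict.get?]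
    | some info =>
      by_cases he : info = []
      · subst he
        simp only [List.foldl_cons, hinfo, reduceIte, ih, List.flatMap_cons, Option.getD_some]
        simp [PySem.Dict.getD, PySem.Dict.get?]
      · simp only [List.foldl_cons, hinfo, if_neg he, ih, List.flatMap_cons, Option.getD_some,
          List.append_assoc]

theorem raw_eq_keptList (results : List (List (String × List (String × List String)))) (w : Bool) :
    (if w then
        (results.foldl (fun acc r =>
          match PySem.Dict.get? (PySem.Dict.mk r) "cert_info" with
          | none => acc
          | some info =>
            if info = [] then acc
            else acc ++ PySem.Dict.getD (PySem.Dict.mk info) "fqdns" []) []).filter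
          (fun f => PySem.Str.startswith f "*.")
      else
        results.foldl (fun acc r =>
          match PySem.Dict.get? (PySem.Dict.mk r) "cert_info" with
          | none => acc
          | some info =>
            if info = [] then acc
            else acc ++ PySem.Dict.getD (PySem.Dict.mk info) "fqdns" []) [])
    = keptList results w := by
  cases w with
  | true => simp [raw0_eq, keptList]
  | false => simp [raw0_eq, keptList]

theorem mem_dedupSorted (xs : List String) : ∀ a, a ∈ dedupSorted xs ↔ a ∈ xs := by
  induction xs with
  | nil => simp [dedupSorted]
  | cons x xs ih =>
    intro a
    rw [dedupSorted]
    by_cases h : dedupSorted xs ≠ [] ∧ (dedupSorted xs).head? = some x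
    · rw [if_pos h]
      have hx : x ∈ xs := by
        have := List.mem_of_mem_head? (by rw [h.2]; exact rfl : x ∈ (dedupSorted xs).head?)
        exact (ih x).mp this
      simp only [List.mem_cons, ih]
      constructor
      · exact Or.inr
      · rintro (rfl | h') <;> [exact hx; exact h']
    · rw [if_neg h]
      simp [ih]

theorem pairwise_lt_dedupSorted (xs : List String) (h : xs.Pairwise (· ≤ ·)) :
    (dedupSorted xs).Pairwise (· < ·) := by
  induction xs with
  | nil => simp [dedupSorted]
  | cons x xs ih =>
    rw [List.pairwise_cons] at h
    obtain ⟨hle, htail⟩ := h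
    have hrest := ih htail
    rw [dedupSorted]
    by_cases hc : dedupSorted xs ≠ [] ∧ (dedupSorted xs).head? = some x
    · rw [if_pos hc]; exact hrest
    · rw [if_neg hc]
      refine List.pairwise_cons.mpr ⟨?_, hrest⟩
      intro e he
      cases hd : dedupSorted xs with
      | nil => rw [hd] at he; exact absurd he (List.not_mem_nil)
      | cons hdh hdt =>
        have hne : hdh ≠ x := by
          intro heq
          exact hc ⟨by rw [hd]; simp, by rw [hd, heq]; rfl⟩
        have hhmem : hdh ∈ xs := (mem_dedupSorted xs hdh).mp (by rw [hd]; exact List.mem_cons_self)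
        have hxh : x < hdh := lt_of_le_of_ne (hle hdh hhmem) (Ne.symm hne)
        rw [hd] at he
        rcases List.mem_cons.mp he with rfl | he'
        · exact hxh
        · have := hrest
          rw [hd] at this
          exact lt_trans hxh ((List.pairwise_cons.mp this).1 e he')

theorem nodup_foldl_add (g : String → String) (xs : List String) (s : PySem.Set String)
    (h : s.Nodup) : (xs.foldl (fun s f => PySem.Set.add s (g f)) s).Nodup := by
  induction xs generalizing s with
  | nil => exact h
  | cons x xs ih => exact ih _ (PySem.Set.nodup_add _ _ h)

theorem mem_foldl_add (g : String → String) (xs : List String) (s : PySem.Set String)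
    (y : String) :
    y ∈ xs.foldl (fun s f => PySem.Set.add s (g f)) s ↔ y ∈ s ∨ ∃ f ∈ xs, g f = y := by
  induction xs generalizing s with
  | nil => simp
  | cons x xs ih =>
    simp only [List.foldl, ih, PySem.Set.mem_add, List.mem_cons]
    constructor
    · rintro ((h | h) | ⟨f, hf, rfl⟩)
      · exact Or.inl h
      · exact Or.inr ⟨x, Or.inl rfl, h.symm⟩
      · exact Or.inr ⟨f, Or.inr hf, rfl⟩
    · rintro (h | ⟨f, (rfl | hf), rfl⟩)
      · exact Or.inl (Or.inl h)
      · exact Or.inl (Or.inr rfl)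
      · exact Or.inr ⟨f, hf, rfl⟩

-- sorted-set fold = sort-then-adjacent-dedup, for any per-element map g
theorem sorted_foldl_eq_dedupSorted (g : String → String) (K : List String) :
    PySem.List.sorted (K.foldl (fun s f => PySem.Set.add s (g f)) []) (fun x => x)
    = dedupSorted (PySem.List.sorted (K.map g) (fun x => x)) := by
  have hpw : (dedupSorted (PySem.List.sorted (K.map g) (fun x => x))).Pairwise (· < ·) :=
    pairwise_lt_dedupSorted _ (PySem.List.sorted_pairwise _ _)
  refine PySem.List.sorted_eq_of_perm_of_pairwise_lt _ _ _ ?_ hpw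
  refine (List.perm_ext_iff_of_nodup ?_ ?_).mpr ?_
  · exact hpw.imp (fun h => ne_of_lt h)
  · exact nodup_foldl_add g K [] List.nodup_nil
  · intro y
    simp only [mem_dedupSorted, PySem.List.mem_sorted, List.mem_map, mem_foldl_add,
      List.not_mem_nil, false_or]

-- ===== VERDICT (by name: the statement is the Claim_ definition above) =====
theorem collect_domains_spec : Claim_equal_collect_domains := by
  intro results w _
  unfold Spec_collect_domains collect_domains collect_domains_alt
  dsimp only
  rw [outer_split, raw_eq_keptList]
  refine Prod.ext ?_ ?_
  · have := sorted_foldl_eq_dedupSorted (fun x => x) (keptList results w)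
    simpa using this
  · exact sorted_foldl_eq_dedupSorted extract_sld (keptList results w)
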